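-- pv_equiv track=rewrite | github.com/aliuyar1234/revision-barriers-llms | src/data/mhst_worlds.py | _late_targets
-- ===== SOURCE A (Python) =====
-- LATE_CATEGORY_ORDER = ["job", "vehicle", "hobby", "clothing", "schedule", "job"]
--
-- CHALLENGER_POSITION_ORDER = [2, 0, 4, 1, 5, 3]
--
-- def _late_targets(challenger: str, late_distractor_cycle: list[str], dose: int) -> list[str]:
--     challenger_positions = set(CHALLENGER_POSITION_ORDER[:dose])
--     targets: list[str] = []
--     distractor_index = 0
--     for position in range(len(LATE_CATEGORY_ORDER)):
--         if position in challenger_positions: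
--             targets.append(challenger)
--         else:
--             targets.append(late_distractor_cycle[distractor_index % len(late_distractor_cycle)])
--             distractor_index += 1
--     return targets
-- ===== SOURCE B (Python) =====
-- LATE_CATEGORY_ORDER = ["job", "vehicle", "hobby", "clothing", "schedule", "job"]
--
-- CHALLENGER_POSITION_ORDER = [2, 0, 4, 1, 5, 3]
--
-- def _late_targets(challenger: str, late_distractor_cycle: list[str], dose: int) -> list[str]:
--     challenger_positions = set(CHALLENGER_POSITION_ORDER[:dose])
--     return [
--         challenger if p in challenger_positions
--         else late_distractor_cycle[
--             (p - sum(1 for c in challenger_positions if c < p))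
--             % len(late_distractor_cycle)
--         ]
--         for p in range(len(LATE_CATEGORY_ORDER))
--     ]
-- ===== Notes on version B (the rewrite author's own statement) =====
-- stated objective: simpler
-- what changed: Replaces the sequential loop with a running distractor_index accumulator by a single comprehension over positions that computes each distractor index in closed form as p minus the number of challenger positions below p.
import Mathlib
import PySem

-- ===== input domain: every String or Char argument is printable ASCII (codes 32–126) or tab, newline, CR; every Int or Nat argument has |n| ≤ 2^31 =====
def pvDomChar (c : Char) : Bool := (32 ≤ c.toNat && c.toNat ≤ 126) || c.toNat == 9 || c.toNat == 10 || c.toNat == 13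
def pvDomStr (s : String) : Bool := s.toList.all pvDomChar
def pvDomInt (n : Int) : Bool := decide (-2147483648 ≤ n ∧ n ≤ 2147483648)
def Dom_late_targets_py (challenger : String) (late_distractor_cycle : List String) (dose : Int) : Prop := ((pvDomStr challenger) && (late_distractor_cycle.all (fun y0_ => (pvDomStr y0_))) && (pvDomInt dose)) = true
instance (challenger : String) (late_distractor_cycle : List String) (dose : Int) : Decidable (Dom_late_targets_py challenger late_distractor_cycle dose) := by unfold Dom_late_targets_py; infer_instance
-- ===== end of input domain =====

-- B replaces A's running distractor_index accumulator by an accumulator-free comprehension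
-- computing each distractor index in closed form (position minus challengers below it); objective: simpler.

-- ===== PORT A =====
def LATE_CATEGORY_ORDER : List String := ["job", "vehicle", "hobby", "clothing", "schedule", "job"]

def CHALLENGER_POSITION_ORDER : List Int := [2, 0, 4, 1, 5, 3]

def late_targets_py (challenger : String) (late_distractor_cycle : List String) (dose : Int) : List String :=
  let challenger_positions : PySem.Set Int :=
    PySem.Set.ofList (PySem.List.slice CHALLENGER_POSITION_ORDER none (some dose))
  let st :=
    (PySem.List.pyRange 0 (LATE_CATEGORY_ORDER.length : Int) 1).foldl
      (fun (st : List String × Int) position =>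
        if PySem.Set.contains challenger_positions position then
          (st.1 ++ [challenger], st.2)
        else
          (st.1 ++ [PySem.List.pyGetD late_distractor_cycle
                      (PySem.Int.mod st.2 (late_distractor_cycle.length : Int)) ""],
           st.2 + 1))
      (([] : List String), (0 : Int))
  st.1

-- ===== PORT B =====
def late_targets_py_alt (challenger : String) (late_distractor_cycle : List String) (dose : Int) : List String :=
  let challenger_positions : PySem.Set Int :=
    PySem.Set.ofList (PySem.List.slice CHALLENGER_POSITION_ORDER none (some dose))
  (PySem.List.pyRange 0 (LATE_CATEGORY_ORDER.length : Int) 1).map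
    (fun p =>
      if PySem.Set.contains challenger_positions p then challenger
      else
        PySem.List.pyGetD late_distractor_cycle
          (PySem.Int.mod (p - (challenger_positions.countP (fun c => decide (c < p)) : Int))
            (late_distractor_cycle.length : Int)) "")

-- ===== PRECONDITION & SPEC =====
-- Pre_ excludes exactly the inputs where A raises ZeroDivisionError: an empty distractor
-- cycle while some position is not a challenger position (dose < 6). B raises there too.
def Pre_late_targets_py (challenger : String) (late_distractor_cycle : List String) (dose : Int) : Prop :=
  late_distractor_cycle ≠ [] ∨ 6 ≤ dose
instance (challenger : String) (late_distractor_cycle : List String) (dose : Int) : Decidable (Pre_late_targets_py challenger late_distractor_cycle dose) := by unfold Pre_late_targets_py; infer_instance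

def pvWitness_late_targets_py : String × List String × Int := ("ch", ["d1", "d2"], 3)

def Spec_late_targets_py (challenger : String) (late_distractor_cycle : List String) (dose : Int) (out : List String) : Prop := out = late_targets_py_alt challenger late_distractor_cycle dose
instance (challenger : String) (late_distractor_cycle : List String) (dose : Int) (out : List String) : Decidable (Spec_late_targets_py challenger late_distractor_cycle dose out) := by unfold Spec_late_targets_py; infer_instance

-- ===== CLAIM (what is proved, stated in full; the proofs are below) =====
def Claim_equal_late_targets_py : Prop := ∀ (challenger : String) (late_distractor_cycle : List String) (dose : Int), Dom_late_targets_py challenger late_distractor_cycle dose → Pre_late_targets_py challenger late_distractor_cycle dose → Spec_late_targets_py challenger late_distractor_cycle dose (late_targets_py challenger late_distractor_cycle dose)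

-- ===== LEMMAS AND PROOFS =====

-- the slice CHALLENGER_POSITION_ORDER[:dose] is always a prefix of the 6-element list
lemma slice_cpo_eq_take (dose : Int) :
    ∃ n ≤ 6, PySem.List.slice CHALLENGER_POSITION_ORDER none (some dose)
      = CHALLENGER_POSITION_ORDER.take n := by
  rcases le_or_gt 0 dose with h | h
  · rw [PySem.List.slice_to _ h]
    rcases le_or_gt dose.toNat 6 with h6 | h6
    · exact ⟨dose.toNat, h6, rfl⟩
    · refine ⟨6, le_refl 6, ?_⟩
      rw [List.take_of_length_le (by simp [CHALLENGER_POSITION_ORDER]; omega),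
        List.take_of_length_le (by simp [CHALLENGER_POSITION_ORDER])]
  · have hk : 0 < (-dose).toNat := by omega
    have hd : dose = -((-dose).toNat : Int) := by omega
    rw [hd, PySem.List.slice_to_neg_natCast _ _ hk]
    exact ⟨CHALLENGER_POSITION_ORDER.length - (-dose).toNat,
      by simp [CHALLENGER_POSITION_ORDER], rfl⟩

lemma ports_agree_of_take (challenger : String) (cycle : List String) (dose : Int) (n : Nat)
    (hn : n ≤ 6)
    (hs : PySem.List.slice CHALLENGER_POSITION_ORDER none (some dose)
      = CHALLENGER_POSITION_ORDER.take n) :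
    late_targets_py challenger cycle dose = late_targets_py_alt challenger cycle dose := by
  unfold late_targets_py late_targets_py_alt
  rw [hs]
  interval_cases n <;> rfl

-- ===== VERDICT (by name: the statement is the Claim_ definition above) =====
theorem late_targets_py_spec : Claim_equal_late_targets_py := by
  intro challenger cycle dose _ _
  obtain ⟨n, hn, hs⟩ := slice_cpo_eq_take dose
  exact ports_agree_of_take challenger cycle dose n hn hs
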